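-- pv_equiv track=rewrite | github.com/gonnawanna/univertasks | Python (diff tasks)/pytask13-11.py | lastmin
-- ===== SOURCE A (Python) =====
-- def lastmin(A):
--     min = A[0]
--     r = 0
--     for i in range(1,len(A)):
--         if A[i] <= min:
--            min = A[i]
--            r = i
--     return r
-- ===== SOURCE B (Python) =====
-- def lastmin(A):
--     m = min(A)
--     for i in range(len(A) - 1, -1, -1):
--         if A[i] == m:
--             return i
-- ===== Notes on version B (the rewrite author's own statement) =====
-- stated objective: alternative
-- what changed: replaces A's single forward accumulating scan (tracking running min and its last index with <=) by a two-phase value-then-locate strategy: compute min(A) first, then scan backwards and return the first index holding it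
-- outside the precondition, e.g. on lastmin([]): A raises IndexError, B raises ValueError
import Mathlib
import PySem

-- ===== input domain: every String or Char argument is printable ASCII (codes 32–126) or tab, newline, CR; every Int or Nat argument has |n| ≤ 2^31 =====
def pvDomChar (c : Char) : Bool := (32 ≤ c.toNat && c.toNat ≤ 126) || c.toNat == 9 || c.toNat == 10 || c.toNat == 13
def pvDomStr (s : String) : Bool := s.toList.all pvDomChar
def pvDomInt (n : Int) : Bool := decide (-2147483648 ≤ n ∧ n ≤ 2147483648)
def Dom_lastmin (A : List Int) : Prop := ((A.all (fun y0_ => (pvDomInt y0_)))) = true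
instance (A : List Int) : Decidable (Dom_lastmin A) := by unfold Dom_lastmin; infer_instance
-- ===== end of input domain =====

-- B replaces A's single forward accumulating scan by a two-phase strategy (compute min(A),
-- then locate its last occurrence by a backwards scan); same O(n) cost, alternative algorithm.

-- ===== PORT A =====
-- loop body of A: 'if A[i] <= min: min = A[i]; r = i'
def pvStepA (A : List Int) (st : Int × Int) (i : Int) : Int × Int :=
  if PySem.List.pyGetD A i 0 ≤ st.1 then (PySem.List.pyGetD A i 0, i) else st

def lastmin (A : List Int) : Int :=
  ((PySem.List.pyRange 1 (A.length : Int) 1).foldl (pvStepA A)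
    (PySem.List.pyGetD A 0 0, 0)).2

-- ===== PORT B =====
def lastmin_alt (A : List Int) : Int :=
  match PySem.List.min? A (fun x => x) with
  | none => 0   -- unreachable under Pre_: Python's min([]) raises, the empty list is excluded
  | some m =>
    match (PySem.List.pyRange ((A.length : Int) - 1) (-1) (-1)).find?
        (fun i => PySem.List.pyGetD A i 0 == m) with
    | some i => i
    | none => 0  -- unreachable: m is an element of A, so the backwards scan always finds it

-- ===== PRECONDITION & SPEC =====
-- A raises IndexError on the empty list (A[0]); B raises ValueError there (min([])).
def Pre_lastmin (A : List Int) : Prop := A ≠ []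
instance (A : List Int) : Decidable (Pre_lastmin A) := by unfold Pre_lastmin; infer_instance

def pvWitness_lastmin : List Int := [3, 1, 2, 1, 4]

def Spec_lastmin (A : List Int) (out : Int) : Prop := out = lastmin_alt A
instance (A : List Int) (out : Int) : Decidable (Spec_lastmin A out) := by unfold Spec_lastmin; infer_instance

-- ===== CLAIM (what is proved, stated in full; the proofs are below) =====
def Claim_equal_lastmin : Prop := ∀ (A : List Int), Dom_lastmin A → Pre_lastmin A → Spec_lastmin A (lastmin A)

-- ===== LEMMAS AND PROOFS =====

-- the full fold state of A's loop
def pvFoldA (A : List Int) : Int × Int :=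
  (PySem.List.pyRange 1 (A.length : Int) 1).foldl (pvStepA A) (PySem.List.pyGetD A 0 0, 0)

theorem pv_foldl_congr_mem {α β : Type} (l : List α) (f g : β → α → β) (b : β)
    (h : ∀ acc, ∀ x ∈ l, f acc x = g acc x) : l.foldl f b = l.foldl g b := by
  induction l generalizing b with
  | nil => rfl
  | cons x t ih =>
      simp only [List.foldl_cons]
      rw [h b x (by simp)]
      exact ih _ (fun acc y hy => h acc y (by simp [hy]))

theorem pv_find?_congr {α : Type} (l : List α) (p q : α → Bool)
    (h : ∀ x ∈ l, p x = q x) : l.find? p = l.find? q := by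
  induction l with
  | nil => rfl
  | cons x t ih =>
      simp only [List.find?_cons]
      rw [h x (by simp)]
      cases q x with
      | true => rfl
      | false => exact ih (fun y hy => h y (by simp [hy]))

theorem pv_getD_append (A : List Int) (x : Int) (i : Int) (h0 : 0 ≤ i) (h : i < (A.length : Int)) :
    PySem.List.pyGetD (A ++ [x]) i 0 = PySem.List.pyGetD A i 0 := by
  rw [PySem.List.pyGetD_eq_getElem (A ++ [x]) 0 h0 (by simp; omega),
      PySem.List.pyGetD_eq_getElem A 0 h0 (by simpa using h)]
  rw [List.getElem_append_left]

-- A's fold over A ++ [x] in terms of A's fold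
theorem pv_foldA_append (A : List Int) (x : Int) (hA : A ≠ []) :
    pvFoldA (A ++ [x]) =
      (if x ≤ (pvFoldA A).1 then (x, (A.length : Int)) else pvFoldA A) := by
  have hlen : (0:Int) < (A.length : Int) := by
    have := List.length_pos_iff.mpr hA; exact_mod_cast this
  unfold pvFoldA
  have hlenA : ((A ++ [x]).length : Int) = (A.length : Int) + 1 := by simp
  rw [hlenA, PySem.List.pyRange_one_succ_right (by omega), List.foldl_append]
  have h0 : PySem.List.pyGetD (A ++ [x]) 0 0 = PySem.List.pyGetD A 0 0 :=
    pv_getD_append A x 0 le_rfl hlen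
  rw [h0]
  have hcongr :
      (PySem.List.pyRange 1 (A.length : Int) 1).foldl (pvStepA (A ++ [x]))
        (PySem.List.pyGetD A 0 0, 0) =
      (PySem.List.pyRange 1 (A.length : Int) 1).foldl (pvStepA A)
        (PySem.List.pyGetD A 0 0, 0) := by
    apply pv_foldl_congr_mem
    intro acc i hi
    have hmem := (PySem.List.mem_pyRange_one).1 hi
    unfold pvStepA
    rw [pv_getD_append A x i (by omega) (by omega)]
  rw [hcongr]
  simp only [List.foldl_cons, List.foldl_nil, pvStepA]
  rw [show PySem.List.pyGetD (A ++ [x]) (A.length : Int) 0 = x by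
    rw [PySem.List.pyGetD_eq_getElem _ 0 (by omega) (by simp)]
    simp]

-- B on A ++ [x] in terms of B on A, given min? A = some m
theorem pv_alt_append (A : List Int) (x m : Int) (hA : A ≠ [])
    (hm : PySem.List.min? A (fun y => y) = some m) :
    lastmin_alt (A ++ [x]) =
      (if x ≤ m then (A.length : Int) else lastmin_alt A) := by
  have hlen : (0:Int) < (A.length : Int) := by
    have := List.length_pos_iff.mpr hA; exact_mod_cast this
  obtain ⟨h, t, rfl⟩ : ∃ h t, A = h :: t := by
    cases A with | nil => exact absurd rfl hA | cons h t => exact ⟨h, t, rfl⟩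
  have hm' : (t.foldl min h) = m := by
    rw [PySem.List.min?_id_cons] at hm
    exact Option.some.injEq _ _ ▸ hm
  have hmin_app : PySem.List.min? ((h :: t) ++ [x]) (fun y => y) = some (min m x) := by
    rw [show (h :: t) ++ [x] = h :: (t ++ [x]) by rfl, PySem.List.min?_id_cons]
    rw [List.foldl_append, hm']
    simp
  unfold lastmin_alt
  rw [hmin_app, hm]
  have hlenapp : (((h :: t) ++ [x]).length : Int) - 1 = ((h :: t).length : Int) := by simp
  rw [hlenapp, PySem.List.pyRange_neg_one_cons (by omega)]
  simp only [List.find?_cons]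
  have hx : PySem.List.pyGetD ((h :: t) ++ [x]) ((h :: t).length : Int) 0 = x := by
    rw [PySem.List.pyGetD_eq_getElem _ 0 (by omega) (by simp)]
    simp
  rw [hx]
  by_cases hle : x ≤ m
  · have : (x == min m x) = true := by simp [min_eq_right hle]
    rw [this]
    simp [hle]
  · have hxm : (x == min m x) = false := by
      have : min m x = m := min_eq_left (le_of_not_ge hle)
      rw [this]; simp; omega
    rw [hxm]
    have hmm : min m x = m := min_eq_left (le_of_not_ge hle)
    rw [hmm]
    have hcongr :
        (PySem.List.pyRange (((h :: t).length : Int) - 1) (-1) (-1)).find?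
          (fun i => PySem.List.pyGetD ((h :: t) ++ [x]) i 0 == m) =
        (PySem.List.pyRange (((h :: t).length : Int) - 1) (-1) (-1)).find?
          (fun i => PySem.List.pyGetD (h :: t) i 0 == m) := by
      apply pv_find?_congr
      intro i hi
      have hmem := (PySem.List.mem_pyRange_neg_one).1 hi
      rw [pv_getD_append _ x i (by omega) (by omega)]
    rw [hcongr]
    simp [hle]

-- the combined invariant: A's running min is min?, and the two results agree
theorem pv_main (A : List Int) (hA : A ≠ []) :
    PySem.List.min? A (fun y => y) = some ((pvFoldA A).1) ∧
      (pvFoldA A).2 = lastmin_alt A := by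
  induction A using List.reverseRecOn with
  | nil => exact absurd rfl hA
  | append_singleton A x ih =>
      by_cases hA0 : A = []
      · subst hA0
        constructor
        · simp [PySem.List.min?_id_cons, pvFoldA,
            PySem.List.pyRange_one_eq_nil, PySem.List.pyGetD_zero_cons]
        · simp only [List.nil_append]
          unfold pvFoldA lastmin_alt
          simp only [PySem.List.min?_id_cons, List.foldl_nil]
          rw [show (([x].length : Int)) = 1 by simp,
              PySem.List.pyRange_one_eq_nil (by omega)]
          rw [show ((1:Int) - 1) = 0 by omega,
              PySem.List.pyRange_neg_one_cons (by omega)]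
          simp [PySem.List.pyGetD_zero_cons]
      · obtain ⟨hmin, hres⟩ := ih hA0
        rw [pv_foldA_append A x hA0, pv_alt_append A x _ hA0 hmin]
        by_cases hle : x ≤ (pvFoldA A).1
        · constructor
          · rw [if_pos hle]
            obtain ⟨h, t, rfl⟩ : ∃ h t, A = h :: t := by
              cases A with
              | nil => exact absurd rfl hA0
              | cons h t => exact ⟨h, t, rfl⟩
            rw [show (h :: t) ++ [x] = h :: (t ++ [x]) by rfl,
                PySem.List.min?_id_cons, List.foldl_append]
            rw [PySem.List.min?_id_cons] at hmin
            have : t.foldl min h = (pvFoldA (h :: t)).1 := by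
              exact Option.some_inj.mp hmin
            rw [this]
            simp [min_eq_right hle]
          · rw [if_pos hle, if_pos hle]
        · constructor
          · rw [if_neg hle]
            obtain ⟨h, t, rfl⟩ : ∃ h t, A = h :: t := by
              cases A with
              | nil => exact absurd rfl hA0
              | cons h t => exact ⟨h, t, rfl⟩
            rw [show (h :: t) ++ [x] = h :: (t ++ [x]) by rfl,
                PySem.List.min?_id_cons, List.foldl_append]
            rw [PySem.List.min?_id_cons] at hmin
            have ht : t.foldl min h = (pvFoldA (h :: t)).1 := Option.some_inj.mp hmin
            rw [ht]
            simp only [List.foldl_cons, List.foldl_nil]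
            rw [min_eq_left (le_of_not_ge hle)]
          · rw [if_neg hle, if_neg hle]
            exact hres

-- ===== VERDICT (by name: the statement is the Claim_ definition above) =====
theorem lastmin_spec : Claim_equal_lastmin := by
  intro A _ hPre
  unfold Spec_lastmin lastmin
  exact (pv_main A hPre).2
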